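-- pv_equiv track=rewrite | github.com/Minhaz-Mahmud/AI_game | a_star.py | evaluate_board
-- ===== SOURCE A (Python) =====
-- def evaluate_board(board):
--     score = 0
--     for row in range(len(board)):
--         for col in range(len(board[0])):
--             if board[row][col] == 'S':
--                 if col + 2 < len(board[0]) and board[row][col + 1] == 'O' and board[row][col + 2] == 'S':
--                     score += 1
--                 if row + 2 < len(board) and board[row + 1][col] == 'O' and board[row + 2][col] == 'S':
--                     score += 1
--                 if row + 2 < len(board) and col + 2 < len(board[0]) and board[row + 1][col + 1] == 'O' and \
--                         board[row + 2][col + 2] == 'S':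
--                     score += 1
--                 if row + 2 < len(board) and col - 2 >= 0 and board[row + 1][col - 1] == 'O' and board[row + 2][
--                     col - 2] == 'S':
--                     score += 1
--             elif board[row][col] == 'O':
--                 if col - 1 >= 0 and col + 1 < len(board[0]) and board[row][col - 1] == 'S' and board[row][
--                     col + 1] == 'S':
--                     score += 1
--                 if row - 1 >= 0 and row + 1 < len(board) and board[row - 1][col] == 'S' and board[row + 1][col] == 'S':
--                     score += 1
--                 if row - 1 >= 0 and row + 1 < len(board) and col - 1 >= 0 and col + 1 < len(board[0]) and \
--                         board[row - 1][col - 1] == 'S' and board[row + 1][col + 1] == 'S':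
--                     score += 1
--                 if row - 1 >= 0 and row + 1 < len(board) and col + 1 < len(board[0]) and col - 1 >= 0 and \
--                         board[row - 1][col + 1] == 'S' and board[row + 1][col - 1] == 'S':
--                     score += 1
--     return score
-- ===== SOURCE B (Python) =====
-- def evaluate_board(board):
--     rows = len(board)
--     if rows == 0:
--         return 0
--     m = len(board[0])
--     lines = [row[:m] for row in board]
--     for c in range(m):
--         lines.append([board[r][c] for r in range(rows)])
--     for d in range(1 - rows, m):
--         lines.append([board[r][r + d] for r in range(rows) if 0 <= r + d < m])
--     for s in range(rows + m - 1):
--         lines.append([board[r][s - r] for r in range(rows) if 0 <= s - r < m])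
--     total = 0
--     for line in lines:
--         for i in range(len(line) - 2):
--             if line[i] == 'S' and line[i + 1] == 'O' and line[i + 2] == 'S':
--                 total += 1
--     return 2 * total
-- ===== Notes on version B (the rewrite author's own statement) =====
-- stated objective: alternative
-- what changed: Replaces A's per-cell eight-branch scan by a line-extraction algorithm: the grid is decomposed into all 1-D lines (rows truncated to the first row's width, columns, diagonals, anti-diagonals), each line is scanned once with a sliding window counting 'SOS' occurrences, and the total is doubled because A counts every SOS twice (once at its starting 'S', once at its middle 'O').
import Mathlib
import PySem

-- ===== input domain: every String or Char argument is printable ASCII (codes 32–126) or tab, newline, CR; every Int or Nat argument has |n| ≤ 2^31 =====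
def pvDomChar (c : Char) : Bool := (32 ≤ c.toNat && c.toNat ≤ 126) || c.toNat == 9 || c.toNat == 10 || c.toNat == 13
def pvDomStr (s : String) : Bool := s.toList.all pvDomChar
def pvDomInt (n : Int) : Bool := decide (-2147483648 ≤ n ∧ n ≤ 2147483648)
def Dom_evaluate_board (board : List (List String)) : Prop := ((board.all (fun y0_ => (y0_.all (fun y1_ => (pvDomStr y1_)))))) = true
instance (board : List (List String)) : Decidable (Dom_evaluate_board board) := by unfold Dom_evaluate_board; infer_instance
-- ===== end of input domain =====

-- B decomposes the grid into 1-D lines (rows, columns, diagonals, anti-diagonals), counts 'SOS'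
-- occurrences with one sliding window per line, and doubles the total (A counts each SOS twice:
-- once at its starting 'S', once at its middle 'O'); same cost, different algorithm.

-- ===== PORT A =====
-- board[r][c] as both Pythons index it; guards keep every performed access in range
-- (out-of-range access raises in Python and is excluded by Pre_; the "" default is never read inside Pre_).
def pvCell (board : List (List String)) (r c : Int) : String :=
  match PySem.List.pyGet? board r with
  | some row => (PySem.List.pyGet? row c).getD ""
  | none => ""

-- one iteration of A's inner loop (the eight sequential `score += 1` branches)
def evalStepA (board : List (List String)) (m : Nat) (r : Nat) (score : Int) (c : Nat) : Int :=
  if pvCell board (r : Int) (c : Int) = "S" then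
    let score := if (c:Int) + 2 < (m:Int) ∧ pvCell board (r:Int) ((c:Int)+1) = "O" ∧ pvCell board (r:Int) ((c:Int)+2) = "S" then score + 1 else score
    let score := if (r:Int) + 2 < (board.length:Int) ∧ pvCell board ((r:Int)+1) (c:Int) = "O" ∧ pvCell board ((r:Int)+2) (c:Int) = "S" then score + 1 else score
    let score := if (r:Int) + 2 < (board.length:Int) ∧ (c:Int) + 2 < (m:Int) ∧ pvCell board ((r:Int)+1) ((c:Int)+1) = "O" ∧ pvCell board ((r:Int)+2) ((c:Int)+2) = "S" then score + 1 else score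
    let score := if (r:Int) + 2 < (board.length:Int) ∧ (c:Int) - 2 ≥ 0 ∧ pvCell board ((r:Int)+1) ((c:Int)-1) = "O" ∧ pvCell board ((r:Int)+2) ((c:Int)-2) = "S" then score + 1 else score
    score
  else if pvCell board (r : Int) (c : Int) = "O" then
    let score := if (c:Int) - 1 ≥ 0 ∧ (c:Int) + 1 < (m:Int) ∧ pvCell board (r:Int) ((c:Int)-1) = "S" ∧ pvCell board (r:Int) ((c:Int)+1) = "S" then score + 1 else score
    let score := if (r:Int) - 1 ≥ 0 ∧ (r:Int) + 1 < (board.length:Int) ∧ pvCell board ((r:Int)-1) (c:Int) = "S" ∧ pvCell board ((r:Int)+1) (c:Int) = "S" then score + 1 else score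
    let score := if (r:Int) - 1 ≥ 0 ∧ (r:Int) + 1 < (board.length:Int) ∧ (c:Int) - 1 ≥ 0 ∧ (c:Int) + 1 < (m:Int) ∧ pvCell board ((r:Int)-1) ((c:Int)-1) = "S" ∧ pvCell board ((r:Int)+1) ((c:Int)+1) = "S" then score + 1 else score
    let score := if (r:Int) - 1 ≥ 0 ∧ (r:Int) + 1 < (board.length:Int) ∧ (c:Int) + 1 < (m:Int) ∧ (c:Int) - 1 ≥ 0 ∧ pvCell board ((r:Int)-1) ((c:Int)+1) = "S" ∧ pvCell board ((r:Int)+1) ((c:Int)-1) = "S" then score + 1 else score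
    score
  else score

def evaluate_board (board : List (List String)) : Int :=
  (List.range board.length).foldl (fun score r =>
    (List.range (board.headD []).length).foldl (evalStepA board (board.headD []).length r) score) 0

-- ===== PORT B =====
-- the inner sliding-window loop of Source B: count of i with line[i:i+3] == ['S','O','S']
-- (Python indexes line[i], line[i+1], line[i+2] only for i < len(line)-2, always in range,
-- so List.getD with an unused default is exact here)
def pvLineCount (line : List String) : Int :=
  (List.range (line.length - 2)).foldl (fun t i =>
    if line.getD i "" = "S" ∧ line.getD (i+1) "" = "O" ∧ line.getD (i+2) "" = "S" then t + 1 else t) 0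

def evaluate_board_alt (board : List (List String)) : Int :=
  if board.length = 0 then 0 else
  let rows : Int := board.length
  let m : Int := (board.headD []).length
  let rowLines := board.map (fun row => PySem.List.slice row none (some m))
  let colLines := (PySem.List.pyRange 0 m 1).map (fun c =>
      (PySem.List.pyRange 0 rows 1).map (fun r => pvCell board r c))
  let diagLines := (PySem.List.pyRange (1 - rows) m 1).map (fun d =>
      ((PySem.List.pyRange 0 rows 1).filter (fun r => decide (0 ≤ r + d ∧ r + d < m))).map
        (fun r => pvCell board r (r + d)))
  let antiLines := (PySem.List.pyRange 0 (rows + m - 1) 1).map (fun s =>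
      ((PySem.List.pyRange 0 rows 1).filter (fun r => decide (0 ≤ s - r ∧ s - r < m))).map
        (fun r => pvCell board r (s - r)))
  2 * (rowLines ++ colLines ++ diagLines ++ antiLines).foldl (fun t line => t + pvLineCount line) 0

-- ===== PRECONDITION & SPEC =====
-- Pre_ excludes exactly the inputs where Python A raises IndexError: a row shorter than the
-- first row, whose missing columns are still indexed (both Pythons raise there).
def Pre_evaluate_board (board : List (List String)) : Prop :=
  ∀ row ∈ board, (board.headD []).length ≤ row.length
instance (board : List (List String)) : Decidable (Pre_evaluate_board board) := by unfold Pre_evaluate_board; infer_instance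

def pvWitness_evaluate_board : List (List String) := [["S", "O", "S"], ["X", "S", "X"]]

def Spec_evaluate_board (board : List (List String)) (out : Int) : Prop := out = evaluate_board_alt board
instance (board : List (List String)) (out : Int) : Decidable (Spec_evaluate_board board out) := by unfold Spec_evaluate_board; infer_instance

-- ===== CLAIM (what is proved, stated in full; the proofs are below) =====
def Claim_equal_evaluate_board : Prop := ∀ (board : List (List String)), Dom_evaluate_board board → Pre_evaluate_board board → Spec_evaluate_board board (evaluate_board board)


-- ===== LEMMAS AND PROOFS =====

def pvTrip (b : List (List String)) (dr dc r c : Int) : Bool :=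
  decide (0 ≤ r ∧ r + 2*dr < (b.length:Int) ∧ 0 ≤ c ∧ c < ((b.headD []).length:Int) ∧ 0 ≤ c + 2*dc ∧ c + 2*dc < ((b.headD []).length:Int)) &&
  (pvCell b r c == "S") && (pvCell b (r+dr) (c+dc) == "O") && (pvCell b (r+2*dr) (c+2*dc) == "S")

def pvInd (b : List (List String)) (dr dc r c : Int) : Int := if pvTrip b dr dc r c then 1 else 0

lemma pvTrip_iff (b : List (List String)) (dr dc r c : Int) :
    pvTrip b dr dc r c = true ↔
    (0 ≤ r ∧ r + 2*dr < (b.length:Int) ∧ 0 ≤ c ∧ c < ((b.headD []).length:Int) ∧ 0 ≤ c + 2*dc ∧ c + 2*dc < ((b.headD []).length:Int)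
      ∧ pvCell b r c = "S" ∧ pvCell b (r+dr) (c+dc) = "O" ∧ pvCell b (r+2*dr) (c+2*dc) = "S") := by
  simp [pvTrip, and_assoc]

-- pvInd with the condition as a Prop
lemma pvInd_eq_ite (b : List (List String)) (dr dc r c : Int) (P : Prop) [Decidable P]
    (h : pvTrip b dr dc r c = true ↔ P) : pvInd b dr dc r c = if P then 1 else 0 := by
  simp only [pvInd]; exact if_congr h rfl rfl



lemma pvInd_zero_start (b : List (List String)) (dr dc r c : Int) (h : pvCell b r c ≠ "S") :
    pvInd b dr dc r c = 0 := by
  simp [pvInd, pvTrip, h]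

lemma pvInd_zero_mid (b : List (List String)) (dr dc r c : Int) (h : pvCell b (r+dr) (c+dc) ≠ "O") :
    pvInd b dr dc r c = 0 := by
  simp [pvInd, pvTrip, h]

lemma pvn_mul0 (x : ℤ) : x + 2*0 = x := by ring
lemma pvn_mul1 (x : ℤ) : x + 2*1 = x + 2 := by ring
lemma pvn1 (x : ℤ) : x + 2*(-1) = x - 2 := by ring
lemma pvn2 (x : ℤ) : x + (-1) = x - 1 := by ring
lemma pvn3 (x : ℤ) : x - 1 + 1 = x := by ring
lemma pvn4 (x : ℤ) : x - 1 + 2 = x + 1 := by ring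
lemma pvn6 (x : ℤ) : x + 1 - 2 = x - 1 := by ring
lemma pvn8 (x : ℤ) : x + 1 - 1 = x := by ring

lemma pvStepA_split (b : List (List String)) (r c : Nat)
    (hr : r < b.length) (hc : c < (b.headD []).length) :
    evalStepA b (b.headD []).length r 0 c =
      pvInd b 0 1 r c + pvInd b 1 0 r c + pvInd b 1 1 r c + pvInd b 1 (-1) r c
    + pvInd b 0 1 r ((c:Int)-1) + pvInd b 1 0 ((r:Int)-1) c
    + pvInd b 1 1 ((r:Int)-1) ((c:Int)-1) + pvInd b 1 (-1) ((r:Int)-1) ((c:Int)+1) := by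
  have hr' : (0:Int) ≤ r := by positivity
  have hc' : (0:Int) ≤ c := by positivity
  have hrR : (r:Int) < (b.length:Int) := by exact_mod_cast hr
  have hcM : (c:Int) < ((b.headD []).length:Int) := by exact_mod_cast hc
  by_cases hS : pvCell b r c = "S"
  · have e1 : pvInd b 0 1 (r:Int) (c:Int) = if ((c:Int)+2 < ((b.headD []).length:Int) ∧ pvCell b r ((c:Int)+1) = "O" ∧ pvCell b r ((c:Int)+2) = "S") then 1 else 0 := by
      apply pvInd_eq_ite; rw [pvTrip_iff]
      constructor
      · rintro ⟨-, -, -, -, -, h6, -, h8, h9⟩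
        refine ⟨by (try simp only [pvn_mul0, pvn_mul1, add_zero, pvn1, pvn2, pvn3, pvn4, pvn6, pvn8] at h6); omega, by simpa only [pvn_mul0, pvn_mul1, add_zero, pvn1, pvn2, pvn3, pvn4, pvn6, pvn8] using h8, by simpa only [pvn_mul0, pvn_mul1, add_zero, pvn1, pvn2, pvn3, pvn4, pvn6, pvn8] using h9⟩
      · rintro ⟨h1, h2, h3⟩
        refine ⟨hr', by omega, hc', hcM, by omega, by (try simp only [pvn_mul0, pvn_mul1, add_zero, pvn1, pvn2, pvn3, pvn4, pvn6, pvn8]); omega, hS, by simpa only [pvn_mul0, pvn_mul1, add_zero, pvn1, pvn2, pvn3, pvn4, pvn6, pvn8] using h2, by simpa only [pvn_mul0, pvn_mul1, add_zero, pvn1, pvn2, pvn3, pvn4, pvn6, pvn8] using h3⟩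
    have e2 : pvInd b 1 0 (r:Int) (c:Int) = if ((r:Int)+2 < (b.length:Int) ∧ pvCell b ((r:Int)+1) c = "O" ∧ pvCell b ((r:Int)+2) c = "S") then 1 else 0 := by
      apply pvInd_eq_ite; rw [pvTrip_iff]
      constructor
      · rintro ⟨-, h2, -, -, -, -, -, h8, h9⟩
        refine ⟨by (try simp only [pvn_mul0, pvn_mul1, add_zero, pvn1, pvn2, pvn3, pvn4, pvn6, pvn8] at h2); omega, by simpa only [pvn_mul0, pvn_mul1, add_zero, pvn1, pvn2, pvn3, pvn4, pvn6, pvn8] using h8, by simpa only [pvn_mul0, pvn_mul1, add_zero, pvn1, pvn2, pvn3, pvn4, pvn6, pvn8] using h9⟩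
      · rintro ⟨h1, h2, h3⟩
        refine ⟨hr', by (try simp only [pvn_mul0, pvn_mul1, add_zero, pvn1, pvn2, pvn3, pvn4, pvn6, pvn8]); omega, hc', hcM, by (try simp only [pvn_mul0, pvn_mul1, add_zero, pvn1, pvn2, pvn3, pvn4, pvn6, pvn8]); omega, by (try simp only [pvn_mul0, pvn_mul1, add_zero, pvn1, pvn2, pvn3, pvn4, pvn6, pvn8]); omega, hS, by simpa only [pvn_mul0, pvn_mul1, add_zero, pvn1, pvn2, pvn3, pvn4, pvn6, pvn8] using h2, by simpa only [pvn_mul0, pvn_mul1, add_zero, pvn1, pvn2, pvn3, pvn4, pvn6, pvn8] using h3⟩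
    have e3 : pvInd b 1 1 (r:Int) (c:Int) = if ((r:Int)+2 < (b.length:Int) ∧ (c:Int)+2 < ((b.headD []).length:Int) ∧ pvCell b ((r:Int)+1) ((c:Int)+1) = "O" ∧ pvCell b ((r:Int)+2) ((c:Int)+2) = "S") then 1 else 0 := by
      apply pvInd_eq_ite; rw [pvTrip_iff]
      constructor
      · rintro ⟨-, h2, -, -, -, h6, -, h8, h9⟩
        refine ⟨by (try simp only [pvn_mul0, pvn_mul1, add_zero, pvn1, pvn2, pvn3, pvn4, pvn6, pvn8] at h2); omega, by (try simp only [pvn_mul0, pvn_mul1, add_zero, pvn1, pvn2, pvn3, pvn4, pvn6, pvn8] at h6); omega, by simpa only [pvn_mul0, pvn_mul1, add_zero, pvn1, pvn2, pvn3, pvn4, pvn6, pvn8] using h8, by simpa only [pvn_mul0, pvn_mul1, add_zero, pvn1, pvn2, pvn3, pvn4, pvn6, pvn8] using h9⟩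
      · rintro ⟨h1, h2, h3, h4⟩
        refine ⟨hr', by (try simp only [pvn_mul0, pvn_mul1, add_zero, pvn1, pvn2, pvn3, pvn4, pvn6, pvn8]); omega, hc', hcM, by (try simp only [pvn_mul0, pvn_mul1, add_zero, pvn1, pvn2, pvn3, pvn4, pvn6, pvn8]); omega, by (try simp only [pvn_mul0, pvn_mul1, add_zero, pvn1, pvn2, pvn3, pvn4, pvn6, pvn8]); omega, hS, by simpa only [pvn_mul0, pvn_mul1, add_zero, pvn1, pvn2, pvn3, pvn4, pvn6, pvn8] using h3, by simpa only [pvn_mul0, pvn_mul1, add_zero, pvn1, pvn2, pvn3, pvn4, pvn6, pvn8] using h4⟩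
    have e4 : pvInd b 1 (-1) (r:Int) (c:Int) = if ((r:Int)+2 < (b.length:Int) ∧ (c:Int)-2 ≥ 0 ∧ pvCell b ((r:Int)+1) ((c:Int)-1) = "O" ∧ pvCell b ((r:Int)+2) ((c:Int)-2) = "S") then 1 else 0 := by
      apply pvInd_eq_ite; rw [pvTrip_iff]
      constructor
      · rintro ⟨-, h2, -, -, h5, -, -, h8, h9⟩
        refine ⟨by (try simp only [pvn_mul0, pvn_mul1, add_zero, pvn1, pvn2, pvn3, pvn4, pvn6, pvn8] at h2); omega, by (try simp only [pvn_mul0, pvn_mul1, add_zero, pvn1, pvn2, pvn3, pvn4, pvn6, pvn8] at h5); omega, by simpa only [pvn_mul0, pvn_mul1, add_zero, pvn1, pvn2, pvn3, pvn4, pvn6, pvn8] using h8, by simpa only [pvn_mul0, pvn_mul1, add_zero, pvn1, pvn2, pvn3, pvn4, pvn6, pvn8] using h9⟩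
      · rintro ⟨h1, h2, h3, h4⟩
        refine ⟨hr', by (try simp only [pvn_mul0, pvn_mul1, add_zero, pvn1, pvn2, pvn3, pvn4, pvn6, pvn8]); omega, hc', hcM, by (try simp only [pvn_mul0, pvn_mul1, add_zero, pvn1, pvn2, pvn3, pvn4, pvn6, pvn8]); omega, by (try simp only [pvn_mul0, pvn_mul1, add_zero, pvn1, pvn2, pvn3, pvn4, pvn6, pvn8]); omega, hS, by simpa only [pvn_mul0, pvn_mul1, add_zero, pvn1, pvn2, pvn3, pvn4, pvn6, pvn8] using h3, by simpa only [pvn_mul0, pvn_mul1, add_zero, pvn1, pvn2, pvn3, pvn4, pvn6, pvn8] using h4⟩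
    have e5 : pvInd b 0 1 (r:Int) ((c:Int)-1) = 0 := by
      apply pvInd_zero_mid; (try simp only [pvn_mul0, pvn_mul1, add_zero, pvn1, pvn2, pvn3, pvn4, pvn6, pvn8]); rw [hS]; decide
    have e6 : pvInd b 1 0 ((r:Int)-1) (c:Int) = 0 := by
      apply pvInd_zero_mid; (try simp only [pvn_mul0, pvn_mul1, add_zero, pvn1, pvn2, pvn3, pvn4, pvn6, pvn8]); rw [hS]; decide
    have e7 : pvInd b 1 1 ((r:Int)-1) ((c:Int)-1) = 0 := by
      apply pvInd_zero_mid; (try simp only [pvn_mul0, pvn_mul1, add_zero, pvn1, pvn2, pvn3, pvn4, pvn6, pvn8]); rw [hS]; decide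
    have e8 : pvInd b 1 (-1) ((r:Int)-1) ((c:Int)+1) = 0 := by
      apply pvInd_zero_mid; (try simp only [pvn_mul0, pvn_mul1, add_zero, pvn1, pvn2, pvn3, pvn4, pvn6, pvn8]); rw [hS]; decide
    rw [e1, e2, e3, e4, e5, e6, e7, e8]
    simp only [evalStepA, if_pos hS, add_zero]
    split_ifs <;> ring
  · by_cases hO : pvCell b r c = "O"
    · have e1 : pvInd b 0 1 (r:Int) (c:Int) = 0 := pvInd_zero_start _ _ _ _ _ hS
      have e2 : pvInd b 1 0 (r:Int) (c:Int) = 0 := pvInd_zero_start _ _ _ _ _ hS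
      have e3 : pvInd b 1 1 (r:Int) (c:Int) = 0 := pvInd_zero_start _ _ _ _ _ hS
      have e4 : pvInd b 1 (-1) (r:Int) (c:Int) = 0 := pvInd_zero_start _ _ _ _ _ hS
      have e5 : pvInd b 0 1 (r:Int) ((c:Int)-1) = if ((c:Int)-1 ≥ 0 ∧ (c:Int)+1 < ((b.headD []).length:Int) ∧ pvCell b r ((c:Int)-1) = "S" ∧ pvCell b r ((c:Int)+1) = "S") then 1 else 0 := by
        apply pvInd_eq_ite; rw [pvTrip_iff]
        constructor
        · rintro ⟨-, -, h3, -, -, h6, h7, -, h9⟩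
          refine ⟨by omega, by (try simp only [pvn_mul0, pvn_mul1, add_zero, pvn1, pvn2, pvn3, pvn4, pvn6, pvn8] at h6); omega, h7, by simpa only [pvn_mul0, pvn_mul1, add_zero, pvn1, pvn2, pvn3, pvn4, pvn6, pvn8] using h9⟩
        · rintro ⟨h1, h2, h3, h4⟩
          refine ⟨hr', by (try simp only [pvn_mul0, pvn_mul1, add_zero, pvn1, pvn2, pvn3, pvn4, pvn6, pvn8]); omega, by omega, by omega, by (try simp only [pvn_mul0, pvn_mul1, add_zero, pvn1, pvn2, pvn3, pvn4, pvn6, pvn8]); omega, by (try simp only [pvn_mul0, pvn_mul1, add_zero, pvn1, pvn2, pvn3, pvn4, pvn6, pvn8]); omega, h3, by (try simp only [pvn_mul0, pvn_mul1, add_zero, pvn1, pvn2, pvn3, pvn4, pvn6, pvn8]); exact hO, by simpa only [pvn_mul0, pvn_mul1, add_zero, pvn1, pvn2, pvn3, pvn4, pvn6, pvn8] using h4⟩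
      have e6 : pvInd b 1 0 ((r:Int)-1) (c:Int) = if ((r:Int)-1 ≥ 0 ∧ (r:Int)+1 < (b.length:Int) ∧ pvCell b ((r:Int)-1) c = "S" ∧ pvCell b ((r:Int)+1) c = "S") then 1 else 0 := by
        apply pvInd_eq_ite; rw [pvTrip_iff]
        constructor
        · rintro ⟨h1, h2, -, -, -, -, h7, -, h9⟩
          refine ⟨by omega, by (try simp only [pvn_mul0, pvn_mul1, add_zero, pvn1, pvn2, pvn3, pvn4, pvn6, pvn8] at h2); omega, h7, by simpa only [pvn_mul0, pvn_mul1, add_zero, pvn1, pvn2, pvn3, pvn4, pvn6, pvn8] using h9⟩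
        · rintro ⟨h1, h2, h3, h4⟩
          refine ⟨by omega, by (try simp only [pvn_mul0, pvn_mul1, add_zero, pvn1, pvn2, pvn3, pvn4, pvn6, pvn8]); omega, hc', hcM, by (try simp only [pvn_mul0, pvn_mul1, add_zero, pvn1, pvn2, pvn3, pvn4, pvn6, pvn8]); omega, by (try simp only [pvn_mul0, pvn_mul1, add_zero, pvn1, pvn2, pvn3, pvn4, pvn6, pvn8]); omega, h3, by (try simp only [pvn_mul0, pvn_mul1, add_zero, pvn1, pvn2, pvn3, pvn4, pvn6, pvn8]); exact hO, by simpa only [pvn_mul0, pvn_mul1, add_zero, pvn1, pvn2, pvn3, pvn4, pvn6, pvn8] using h4⟩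
      have e7 : pvInd b 1 1 ((r:Int)-1) ((c:Int)-1) = if ((r:Int)-1 ≥ 0 ∧ (r:Int)+1 < (b.length:Int) ∧ (c:Int)-1 ≥ 0 ∧ (c:Int)+1 < ((b.headD []).length:Int) ∧ pvCell b ((r:Int)-1) ((c:Int)-1) = "S" ∧ pvCell b ((r:Int)+1) ((c:Int)+1) = "S") then 1 else 0 := by
        apply pvInd_eq_ite; rw [pvTrip_iff]
        constructor
        · rintro ⟨h1, h2, h3, -, -, h6, h7, -, h9⟩
          refine ⟨by omega, by (try simp only [pvn_mul0, pvn_mul1, add_zero, pvn1, pvn2, pvn3, pvn4, pvn6, pvn8] at h2); omega, by omega, by (try simp only [pvn_mul0, pvn_mul1, add_zero, pvn1, pvn2, pvn3, pvn4, pvn6, pvn8] at h6); omega, h7, by simpa only [pvn_mul0, pvn_mul1, add_zero, pvn1, pvn2, pvn3, pvn4, pvn6, pvn8] using h9⟩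
        · rintro ⟨h1, h2, h3, h4, h5, h6⟩
          refine ⟨by omega, by (try simp only [pvn_mul0, pvn_mul1, add_zero, pvn1, pvn2, pvn3, pvn4, pvn6, pvn8]); omega, by omega, by omega, by (try simp only [pvn_mul0, pvn_mul1, add_zero, pvn1, pvn2, pvn3, pvn4, pvn6, pvn8]); omega, by (try simp only [pvn_mul0, pvn_mul1, add_zero, pvn1, pvn2, pvn3, pvn4, pvn6, pvn8]); omega, h5, by (try simp only [pvn_mul0, pvn_mul1, add_zero, pvn1, pvn2, pvn3, pvn4, pvn6, pvn8]); exact hO, by simpa only [pvn_mul0, pvn_mul1, add_zero, pvn1, pvn2, pvn3, pvn4, pvn6, pvn8] using h6⟩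
      have e8 : pvInd b 1 (-1) ((r:Int)-1) ((c:Int)+1) = if ((r:Int)-1 ≥ 0 ∧ (r:Int)+1 < (b.length:Int) ∧ (c:Int)+1 < ((b.headD []).length:Int) ∧ (c:Int)-1 ≥ 0 ∧ pvCell b ((r:Int)-1) ((c:Int)+1) = "S" ∧ pvCell b ((r:Int)+1) ((c:Int)-1) = "S") then 1 else 0 := by
        apply pvInd_eq_ite; rw [pvTrip_iff]
        constructor
        · rintro ⟨h1, h2, -, h4, h5, -, h7, -, h9⟩
          simp only [pvn_mul0, pvn_mul1, add_zero, pvn1, pvn2, pvn3, pvn4, pvn6, pvn8] at h2 h5 h9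
          exact ⟨by omega, by omega, by omega, by omega, h7, h9⟩
        · rintro ⟨h1, h2, h3, h4, h5, h6⟩
          refine ⟨by omega, by (try simp only [pvn_mul0, pvn_mul1, add_zero, pvn1, pvn2, pvn3, pvn4, pvn6, pvn8]); omega, by omega, by omega, by (try simp only [pvn_mul0, pvn_mul1, add_zero, pvn1, pvn2, pvn3, pvn4, pvn6, pvn8]); omega, by (try simp only [pvn_mul0, pvn_mul1, add_zero, pvn1, pvn2, pvn3, pvn4, pvn6, pvn8]); omega, h5, by (try simp only [pvn_mul0, pvn_mul1, add_zero, pvn1, pvn2, pvn3, pvn4, pvn6, pvn8]); exact hO, by simpa only [pvn_mul0, pvn_mul1, add_zero, pvn1, pvn2, pvn3, pvn4, pvn6, pvn8] using h6⟩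
      rw [e1, e2, e3, e4, e5, e6, e7, e8]
      simp only [evalStepA, if_neg hS, if_pos hO, zero_add]
      split_ifs <;> ring
    · have m1 : pvInd b 0 1 (r:Int) ((c:Int)-1) = 0 := by
        apply pvInd_zero_mid; (try simp only [pvn_mul0, pvn_mul1, add_zero, pvn1, pvn2, pvn3, pvn4, pvn6, pvn8]); exact hO
      have m2 : pvInd b 1 0 ((r:Int)-1) (c:Int) = 0 := by
        apply pvInd_zero_mid; (try simp only [pvn_mul0, pvn_mul1, add_zero, pvn1, pvn2, pvn3, pvn4, pvn6, pvn8]); exact hO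
      have m3 : pvInd b 1 1 ((r:Int)-1) ((c:Int)-1) = 0 := by
        apply pvInd_zero_mid; (try simp only [pvn_mul0, pvn_mul1, add_zero, pvn1, pvn2, pvn3, pvn4, pvn6, pvn8]); exact hO
      have m4 : pvInd b 1 (-1) ((r:Int)-1) ((c:Int)+1) = 0 := by
        apply pvInd_zero_mid; (try simp only [pvn_mul0, pvn_mul1, add_zero, pvn1, pvn2, pvn3, pvn4, pvn6, pvn8]); exact hO
      rw [pvInd_zero_start _ _ _ _ _ hS, pvInd_zero_start _ _ _ _ _ hS, pvInd_zero_start _ _ _ _ _ hS, pvInd_zero_start _ _ _ _ _ hS, m1, m2, m3, m4]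
      simp [evalStepA, hS, hO]


-- === generic fold/sum bridges ===
lemma pvFoldlCongr {b : Type} (l : List b) (f : Int → b → Int) (g : b → Int)
    (H : ∀ s x, f s x = s + g x) : ∀ a, l.foldl f a = l.foldl (fun s x => s + g x) a := by
  induction l with
  | nil => intro a; rfl
  | cons x t ih => intro a; simp only [List.foldl]; rw [H a x, ih]

lemma pvFoldlShift {b : Type} (l : List b) (g : b → Int) :
    ∀ a : Int, l.foldl (fun s x => s + g x) a = a + l.foldl (fun s x => s + g x) 0 := by
  induction l with
  | nil => intro a; simp
  | cons x t ih => intro a; simp only [List.foldl]; rw [ih (a + g x), ih (0 + g x)]; ring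

lemma pvFoldlAddRange (n : Nat) (f : Nat → Int) :
    (List.range n).foldl (fun s i => s + f i) 0 = ∑ i ∈ Finset.range n, f i := by
  induction n with
  | zero => rfl
  | succ n ih => simp [List.range_succ, List.foldl_append, pvFoldlShift, ih, Finset.sum_range_succ]

lemma pvSumIcoSucc (a b : ℤ) (f : ℤ → ℤ) (h : a ≤ b) :
    ∑ x ∈ Finset.Ico a (b+1), f x = (∑ x ∈ Finset.Ico a b, f x) + f b := by
  have : Finset.Ico a (b+1) = insert b (Finset.Ico a b) := by
    ext x; simp [Finset.mem_Ico, Finset.mem_insert]; omega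
  rw [this, Finset.sum_insert (by simp)]; ring

lemma pvRangeIcoShift (a : ℤ) (n : Nat) (f : ℤ → ℤ) :
    ∑ i ∈ Finset.range n, f (a + i) = ∑ x ∈ Finset.Ico a (a + (n:ℤ)), f x := by
  induction n with
  | zero => simp
  | succ n ih =>
    rw [Finset.sum_range_succ, ih, show a + ((n+1:Nat):ℤ) = (a + n) + 1 by push_cast; ring,
      pvSumIcoSucc _ _ _ (by omega)]

lemma pvRangeIco (n : Nat) (f : ℤ → ℤ) :
    ∑ i ∈ Finset.range n, f (i:ℤ) = ∑ x ∈ Finset.Ico (0:ℤ) (n:ℤ), f x := by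
  have := pvRangeIcoShift 0 n f
  simpa using this

-- one iteration of A's inner loop is the accumulator plus its zero-based value
lemma pvStepA_shift (b : List (List String)) (m r : Nat) (s : Int) (c : Nat) :
    evalStepA b m r s c = s + evalStepA b m r 0 c := by
  simp only [evalStepA]; split_ifs <;> ring

-- === the canonical per-direction counts (proof layer) ===
def pvG (b : List (List String)) (r c : ℤ) : ℤ :=
  pvInd b 0 1 r c + pvInd b 1 0 r c + pvInd b 1 1 r c + pvInd b 1 (-1) r c
    + pvInd b 0 1 r (c-1) + pvInd b 1 0 (r-1) c
    + pvInd b 1 1 (r-1) (c-1) + pvInd b 1 (-1) (r-1) (c+1)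

lemma pvA_as_sums (b : List (List String)) :
    evaluate_board b
      = ∑ r ∈ Finset.Ico (0:ℤ) (b.length:ℤ), ∑ c ∈ Finset.Ico (0:ℤ) ((b.headD []).length:ℤ), pvG b r c := by
  have hA : evaluate_board b = ∑ r ∈ Finset.range b.length,
      ∑ c ∈ Finset.range (b.headD []).length, pvG b r c := by
    simp only [evaluate_board]
    rw [pvFoldlCongr _ _ (fun r => (List.range (b.headD []).length).foldl (evalStepA b (b.headD []).length r) 0)
        (fun s r => by
          rw [pvFoldlCongr _ (evalStepA b (b.headD []).length r)
                (fun c => evalStepA b (b.headD []).length r 0 c)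
                (fun s' c => pvStepA_shift b (b.headD []).length r s' c) s,
              pvFoldlShift]
          exact congrArg (s + ·) (pvFoldlCongr _ (evalStepA b (b.headD []).length r)
                (fun c => evalStepA b (b.headD []).length r 0 c)
                (fun s' c => pvStepA_shift b (b.headD []).length r s' c) 0).symm)]
    rw [pvFoldlAddRange]
    refine Finset.sum_congr rfl (fun r hr => ?_)
    rw [pvFoldlCongr _ (evalStepA b (b.headD []).length r)
          (fun c => evalStepA b (b.headD []).length r 0 c)
          (fun s' c => pvStepA_shift b (b.headD []).length r s' c) 0,
        pvFoldlAddRange]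
    refine Finset.sum_congr rfl (fun c hc => ?_)
    rw [pvStepA_split b r c (Finset.mem_range.mp hr) (Finset.mem_range.mp hc)]
    rfl
  rw [hA]
  calc ∑ r ∈ Finset.range b.length, ∑ c ∈ Finset.range (b.headD []).length, pvG b r c
      = ∑ r ∈ Finset.range b.length, (fun x => ∑ c ∈ Finset.range (b.headD []).length, pvG b x c) (r:ℤ) := rfl
    _ = ∑ x ∈ Finset.Ico (0:ℤ) (b.length:ℤ), (fun x => ∑ c ∈ Finset.range (b.headD []).length, pvG b x c) x :=
        pvRangeIco b.length (fun x => ∑ c ∈ Finset.range (b.headD []).length, pvG b x (c:ℤ))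
    _ = ∑ x ∈ Finset.Ico (0:ℤ) (b.length:ℤ), ∑ y ∈ Finset.Ico (0:ℤ) ((b.headD []).length:ℤ), pvG b x y :=
        Finset.sum_congr rfl (fun x _ => pvRangeIco _ (pvG b x))

lemma pvTrip_bounds {b : List (List String)} {dr dc r c : ℤ} (h : pvTrip b dr dc r c = true) :
    0 ≤ r ∧ r + 2*dr < (b.length:ℤ) ∧ 0 ≤ c ∧ c < ((b.headD []).length:ℤ)
      ∧ 0 ≤ c + 2*dc ∧ c + 2*dc < ((b.headD []).length:ℤ) := by
  rw [pvTrip_iff] at h; tauto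

-- the middle of every triple is itself a grid cell: counting triples by their middle cell
-- equals counting them by their start cell
lemma pvShift (b : List (List String)) (dr dc : ℤ) (hdr : 0 ≤ dr) (hdc : dc = -1 ∨ 0 ≤ dc) :
    (∑ r ∈ Finset.Ico (0:ℤ) (b.length:ℤ), ∑ c ∈ Finset.Ico (0:ℤ) ((b.headD []).length:ℤ),
        pvInd b dr dc (r-dr) (c-dc))
  = ∑ r ∈ Finset.Ico (0:ℤ) (b.length:ℤ), ∑ c ∈ Finset.Ico (0:ℤ) ((b.headD []).length:ℤ),
        pvInd b dr dc r c := by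
  rw [← Finset.sum_product', ← Finset.sum_product']
  simp only [pvInd]
  rw [Finset.sum_boole, Finset.sum_boole]
  refine congrArg _ ?_
  refine Finset.card_bij (fun p _ => (p.1 - dr, p.2 - dc)) ?_ ?_ ?_
  · rintro ⟨r, c⟩ hp
    dsimp only
    rw [Finset.mem_filter] at hp ⊢
    obtain ⟨hmem, htrip⟩ := hp
    have hb := pvTrip_bounds htrip
    constructor
    · rw [Finset.mem_product]; constructor <;> rw [Finset.mem_Ico] <;> omega
    · exact htrip
  · intro p hp q hq h
    dsimp only at h
    obtain ⟨h1, h2⟩ := Prod.mk.injEq .. ▸ h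
    have e1 : p.1 = q.1 := by omega
    have e2 : p.2 = q.2 := by omega
    exact Prod.ext e1 e2
  · rintro ⟨r, c⟩ hq
    dsimp only
    rw [Finset.mem_filter] at hq
    obtain ⟨hmem, htrip⟩ := hq
    have hb := pvTrip_bounds htrip
    refine ⟨(r + dr, c + dc), ?_, ?_⟩
    · rw [Finset.mem_filter]
      constructor
      · rw [Finset.mem_product]
        constructor <;> rw [Finset.mem_Ico] <;> rcases hdc with h | h <;> constructor <;> omega
      · simp only [add_sub_cancel_right]
        exact htrip
    · simp only [add_sub_cancel_right]

-- === B-side bridges ===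
lemma pvFoldlMapSum {α : Type} (l : List α) (g : α → ℤ) :
    l.foldl (fun t x => t + g x) 0 = (l.map g).sum := by
  induction l with
  | nil => rfl
  | cons x xs ih => simp only [List.foldl, List.map, List.sum_cons, pvFoldlShift, ih]; ring

lemma pvSumListRange (n : Nat) (g : Nat → ℤ) :
    ((List.range n).map g).sum = ∑ i ∈ Finset.range n, g i := by
  rw [← pvFoldlMapSum, pvFoldlAddRange]

lemma pvMapSumIdx {α : Type} (l : List α) (d : α) (g : α → ℤ) :
    (l.map g).sum = ∑ i ∈ Finset.range l.length, g (l.getD i d) := by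
  induction l with
  | nil => rfl
  | cons x xs ih =>
    rw [List.map_cons, List.sum_cons, ih, List.length_cons, Finset.sum_range_succ']
    simp [List.getD]
    ring

lemma pvSumPyRangeMap (a b : ℤ) (f : ℤ → ℤ) :
    ((PySem.List.pyRange a b 1).map f).sum = ∑ x ∈ Finset.Ico a b, f x := by
  rw [PySem.List.pyRange_one, List.map_map]
  rw [show (f ∘ fun k : Nat => a + (k:ℤ)) = fun n : Nat => f (a + (n:ℤ)) from rfl]
  rw [pvSumListRange, pvRangeIcoShift]
  by_cases h : a ≤ b
  · rw [show a + ((b - a).toNat : ℤ) = b by omega]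
  · rw [show ((b-a).toNat : ℤ) = 0 by omega]
    rw [Finset.Ico_eq_empty (by omega), Finset.Ico_eq_empty (by omega)]

lemma pvSumIcoShiftVar (r a b : ℤ) (F : ℤ → ℤ) :
    ∑ d ∈ Finset.Ico a b, F (r + d) = ∑ c ∈ Finset.Ico (r + a) (r + b), F c := by
  rw [← Finset.map_add_left_Ico, Finset.sum_map]
  rfl

lemma pvFilterPyRange (p : ℤ → Bool) (lo hi : ℤ) (hp : ∀ x, p x = true ↔ (lo ≤ x ∧ x < hi)) :
    ∀ (n : Nat) (a b : ℤ), (b - a).toNat = n →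
      (PySem.List.pyRange a b 1).filter p = PySem.List.pyRange (max a lo) (min b hi) 1 := by
  intro n
  induction n with
  | zero =>
    intro a b hn
    rw [PySem.List.pyRange_one_eq_nil (by omega), PySem.List.pyRange_one_eq_nil (by omega)]
    rfl
  | succ n ih =>
    intro a b hn
    rw [PySem.List.pyRange_one_cons (by omega), List.filter_cons]
    by_cases hpa : p a = true
    · have ha := (hp a).mp hpa
      rw [if_pos hpa, ih (a+1) b (by omega), show max (a+1) lo = a + 1 by omega,
        show max a lo = a by omega, ← PySem.List.pyRange_one_cons (by omega : a < min b hi)]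
    · rw [if_neg hpa, ih (a+1) b (by omega)]
      have ha := hp a
      have : ¬ (lo ≤ a ∧ a < hi) := fun h => hpa (ha.mpr h)
      by_cases h1 : a < lo
      · rw [show max (a+1) lo = max a lo by omega]
      · have h2 : hi ≤ a := by omega
        rw [PySem.List.pyRange_one_eq_nil (by omega), PySem.List.pyRange_one_eq_nil (by omega)]

lemma pvLineCount_sum (line : List String) :
    pvLineCount line = ∑ i ∈ Finset.range (line.length - 2),
      (if line.getD i "" = "S" ∧ line.getD (i+1) "" = "O" ∧ line.getD (i+2) "" = "S" then (1:ℤ) else 0) := by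
  unfold pvLineCount
  rw [pvFoldlCongr _ _ (fun i => if line.getD i "" = "S" ∧ line.getD (i+1) "" = "O" ∧ line.getD (i+2) "" = "S" then (1:ℤ) else 0)
      (fun s i => by
        by_cases h : line.getD i "" = "S" ∧ line.getD (i+1) "" = "O" ∧ line.getD (i+2) "" = "S"
        · simp only [if_pos h]
        · simp only [if_neg h]; ring), pvFoldlAddRange]

lemma pvGetD_map_pyRange' (a b : ℤ) (f : ℤ → String) (i : Nat) (hi : i < (b - a).toNat) :
    ((PySem.List.pyRange a b 1).map f).getD i "" = f (a + i) := by
  rw [PySem.List.pyRange_one, List.map_map]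
  rw [List.getD_eq_getElem?_getD, List.getElem?_map, List.getElem?_range hi]
  rfl

lemma pvLineCount_sumIco (lo hi : ℤ) (f : ℤ → String) :
    pvLineCount ((PySem.List.pyRange lo hi 1).map f)
      = ∑ t ∈ Finset.Ico lo (hi - 2), (if f t = "S" ∧ f (t+1) = "O" ∧ f (t+2) = "S" then (1:ℤ) else 0) := by
  rw [pvLineCount_sum]
  have hlen : ((PySem.List.pyRange lo hi 1).map f).length = (hi - lo).toNat := by
    rw [List.length_map, PySem.List.length_pyRange_one]
  rw [hlen]
  have key : ∀ i ∈ Finset.range ((hi - lo).toNat - 2),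
      (if ((PySem.List.pyRange lo hi 1).map f).getD i "" = "S" ∧ ((PySem.List.pyRange lo hi 1).map f).getD (i+1) "" = "O" ∧ ((PySem.List.pyRange lo hi 1).map f).getD (i+2) "" = "S" then (1:ℤ) else 0)
        = (fun x : ℤ => if f x = "S" ∧ f (x+1) = "O" ∧ f (x+2) = "S" then (1:ℤ) else 0) (lo + (i:ℤ)) := by
    intro i hi'
    rw [Finset.mem_range] at hi'
    rw [pvGetD_map_pyRange' _ _ _ i (by omega), pvGetD_map_pyRange' _ _ _ (i+1) (by omega),
      pvGetD_map_pyRange' _ _ _ (i+2) (by omega)]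
    have e1 : lo + ((i+1:Nat):ℤ) = lo + (i:ℤ) + 1 := by push_cast; ring
    have e2 : lo + ((i+2:Nat):ℤ) = lo + (i:ℤ) + 2 := by push_cast; ring
    rw [e1, e2]
  rw [Finset.sum_congr rfl key,
    pvRangeIcoShift lo ((hi - lo).toNat - 2) (fun x : ℤ => if f x = "S" ∧ f (x+1) = "O" ∧ f (x+2) = "S" then (1:ℤ) else 0)]
  by_cases h : lo ≤ hi - 2
  · rw [show lo + (((hi - lo).toNat - 2 : Nat) : ℤ) = hi - 2 by omega]
  · rw [show (((hi - lo).toNat - 2 : Nat) : ℤ) = 0 by omega]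
    rw [Finset.Ico_eq_empty (by omega), Finset.Ico_eq_empty (by omega)]

lemma pvInd_eq_zero_of_out (b : List (List String)) (dr dc r c : ℤ)
    (h : ¬(0 ≤ r ∧ r + 2*dr < (b.length:ℤ) ∧ 0 ≤ c ∧ c < ((b.headD []).length:ℤ)
        ∧ 0 ≤ c + 2*dc ∧ c + 2*dc < ((b.headD []).length:ℤ))) : pvInd b dr dc r c = 0 := by
  simp only [pvInd]
  rw [if_neg]
  intro ht
  exact h (pvTrip_bounds ht)

lemma pvInd_window (b : List (List String)) (dr dc r c : ℤ)
    (h1 : 0 ≤ r) (h2 : r + 2*dr < (b.length:ℤ)) (h3 : 0 ≤ c) (h4 : c < ((b.headD []).length:ℤ))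
    (h5 : 0 ≤ c + 2*dc) (h6 : c + 2*dc < ((b.headD []).length:ℤ)) :
    pvInd b dr dc r c
      = if (pvCell b r c = "S" ∧ pvCell b (r+dr) (c+dc) = "O" ∧ pvCell b (r+2*dr) (c+2*dc) = "S") then 1 else 0 := by
  apply pvInd_eq_ite
  rw [pvTrip_iff]
  constructor
  · tauto
  · rintro ⟨a1, a2, a3⟩; exact ⟨h1, h2, h3, h4, h5, h6, a1, a2, a3⟩

-- rows of the grid: a row line counts exactly the horizontal triples of that row
lemma pvRowLineSum (b : List (List String)) (r : ℤ) (hr1 : 0 ≤ r) (hr2 : r < (b.length:ℤ)) :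
    pvLineCount ((PySem.List.pyRange 0 ((b.headD []).length:ℤ) 1).map (fun c => pvCell b r c))
      = ∑ c ∈ Finset.Ico (0:ℤ) ((b.headD []).length:ℤ), pvInd b 0 1 r c := by
  rw [pvLineCount_sumIco]
  have step : ∀ t ∈ Finset.Ico (0:ℤ) (((b.headD []).length:ℤ) - 2),
      (if pvCell b r t = "S" ∧ pvCell b (r) (t+1) = "O" ∧ pvCell b (r) (t+2) = "S" then (1:ℤ) else 0)
        = pvInd b 0 1 r t := by
    intro t ht
    rw [Finset.mem_Ico] at ht
    rw [pvInd_window b 0 1 r t hr1 (by omega) (by omega) (by omega) (by omega) (by omega)]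
    simp only [pvn_mul0, pvn_mul1, add_zero]
  rw [Finset.sum_congr rfl step]
  exact Finset.sum_subset (Finset.Ico_subset_Ico (le_refl 0) (by omega))
    (fun c hc hcn => by
      rw [Finset.mem_Ico] at hc
      rw [Finset.mem_Ico] at hcn
      exact pvInd_eq_zero_of_out b 0 1 r c (by intro hb; omega))

-- columns: a column line counts exactly the vertical triples of that column
lemma pvColLineSum (b : List (List String)) (c : ℤ) (hc1 : 0 ≤ c) (hc2 : c < ((b.headD []).length:ℤ)) :
    pvLineCount ((PySem.List.pyRange 0 (b.length:ℤ) 1).map (fun r => pvCell b r c))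
      = ∑ r ∈ Finset.Ico (0:ℤ) (b.length:ℤ), pvInd b 1 0 r c := by
  rw [pvLineCount_sumIco]
  have step : ∀ t ∈ Finset.Ico (0:ℤ) ((b.length:ℤ) - 2),
      (if pvCell b t c = "S" ∧ pvCell b (t+1) c = "O" ∧ pvCell b (t+2) c = "S" then (1:ℤ) else 0)
        = pvInd b 1 0 t c := by
    intro t ht
    rw [Finset.mem_Ico] at ht
    rw [pvInd_window b 1 0 t c (by omega) (by omega) hc1 hc2 (by omega) (by omega)]
    simp only [pvn_mul0, pvn_mul1, add_zero]
  rw [Finset.sum_congr rfl step]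
  exact Finset.sum_subset (Finset.Ico_subset_Ico (le_refl 0) (by omega))
    (fun r hr hrn => by
      rw [Finset.mem_Ico] at hr
      rw [Finset.mem_Ico] at hrn
      exact pvInd_eq_zero_of_out b 1 0 r c (by intro hb; omega))

-- a diagonal line (constant c - r = d) counts exactly the ↘ triples on it
lemma pvDiagLineSum (b : List (List String)) (d : ℤ) :
    pvLineCount ((PySem.List.pyRange (max 0 (-d)) (min (b.length:ℤ) (((b.headD []).length:ℤ) - d)) 1).map
        (fun r => pvCell b r (r+d)))
      = ∑ r ∈ Finset.Ico (0:ℤ) (b.length:ℤ), pvInd b 1 1 r (r+d) := by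
  rw [pvLineCount_sumIco]
  have step : ∀ t ∈ Finset.Ico (max 0 (-d)) (min (b.length:ℤ) (((b.headD []).length:ℤ) - d) - 2),
      (if pvCell b t (t+d) = "S" ∧ pvCell b (t+1) (t+1+d) = "O" ∧ pvCell b (t+2) (t+2+d) = "S" then (1:ℤ) else 0)
        = pvInd b 1 1 t (t+d) := by
    intro t ht
    rw [Finset.mem_Ico] at ht
    rw [pvInd_window b 1 1 t (t+d) (by omega) (by omega) (by omega) (by omega) (by omega) (by omega)]
    rw [show t + d + 1 = t + 1 + d by ring, show t + d + 2*1 = t + 2 + d by ring,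
      show t + 2*1 = t + 2 from by ring]
  rw [Finset.sum_congr rfl step]
  exact Finset.sum_subset (by apply Finset.Ico_subset_Ico <;> omega)
    (fun r hr hrn => by
      rw [Finset.mem_Ico] at hr
      rw [Finset.mem_Ico] at hrn
      exact pvInd_eq_zero_of_out b 1 1 r (r+d) (by intro hb; omega))

-- an anti-diagonal line (constant r + c = s) counts exactly the ↙ triples on it
lemma pvAntiLineSum (b : List (List String)) (s : ℤ) :
    pvLineCount ((PySem.List.pyRange (max 0 (s - ((b.headD []).length:ℤ) + 1)) (min (b.length:ℤ) (s+1)) 1).map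
        (fun r => pvCell b r (s-r)))
      = ∑ r ∈ Finset.Ico (0:ℤ) (b.length:ℤ), pvInd b 1 (-1) r (s-r) := by
  rw [pvLineCount_sumIco]
  have step : ∀ t ∈ Finset.Ico (max 0 (s - ((b.headD []).length:ℤ) + 1)) (min (b.length:ℤ) (s+1) - 2),
      (if pvCell b t (s-t) = "S" ∧ pvCell b (t+1) (s-(t+1)) = "O" ∧ pvCell b (t+2) (s-(t+2)) = "S" then (1:ℤ) else 0)
        = pvInd b 1 (-1) t (s-t) := by
    intro t ht
    rw [Finset.mem_Ico] at ht
    rw [pvInd_window b 1 (-1) t (s-t) (by omega) (by omega) (by omega) (by omega) (by omega) (by omega)]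
    rw [show s - t + -1 = s - (t+1) by ring, show s - t + 2*(-1) = s - (t+2) by ring,
      show t + 2*1 = t + 2 from by ring]
  rw [Finset.sum_congr rfl step]
  exact Finset.sum_subset (by apply Finset.Ico_subset_Ico <;> omega)
    (fun r hr hrn => by
      rw [Finset.mem_Ico] at hr
      rw [Finset.mem_Ico] at hrn
      exact pvInd_eq_zero_of_out b 1 (-1) r (s-r) (by intro hb; omega))

-- under Pre_, row r truncated to the first row's width is exactly the horizontal line of pvCells
lemma pvRowLine_eq (b : List (List String)) (hPre : Pre_evaluate_board b) (r : Nat) (hr : r < b.length) :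
    PySem.List.slice (b.getD r []) none (some ((b.headD []).length:ℤ))
      = (PySem.List.pyRange 0 ((b.headD []).length:ℤ) 1).map (fun c => pvCell b (r:ℤ) c) := by
  have hrow : b.getD r [] = b[r] := List.getD_eq_getElem _ _ hr
  have hlen : (b.headD []).length ≤ b[r].length := hPre b[r] (List.getElem_mem hr)
  rw [PySem.List.slice_to_natCast, hrow]
  apply List.ext_getElem
  · rw [List.length_take, List.length_map, PySem.List.length_pyRange_one]
    omega
  · intro i h1 h2
    rw [List.length_take] at h1
    have hi : i < (b.headD []).length := by omega
    have hib : i < b[r].length := by omega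
    rw [List.getElem_take, List.getElem_map, PySem.List.getElem_pyRange_one]
    have e1 : PySem.List.pyGet? b (r:ℤ) = some b[r] := by
      rw [PySem.List.pyGet?_natCast, List.getElem?_eq_getElem hr]
    have e2 : PySem.List.pyGet? b[r] ((0:ℤ)+(i:ℤ)) = some (b[r][i]'hib) := by
      rw [zero_add, PySem.List.pyGet?_natCast, List.getElem?_eq_getElem hib]
    simp [pvCell, e1, e2, List.getElem?_eq_getElem hib]

-- === the four family totals ===
lemma pvRowsTotal (b : List (List String)) (hPre : Pre_evaluate_board b) :
    ((b.map (fun row => PySem.List.slice row none (some ((b.headD []).length:ℤ)))).map pvLineCount).sum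
      = ∑ r ∈ Finset.Ico (0:ℤ) (b.length:ℤ), ∑ c ∈ Finset.Ico (0:ℤ) ((b.headD []).length:ℤ), pvInd b 0 1 r c := by
  rw [List.map_map,
    pvMapSumIdx b [] (pvLineCount ∘ fun row => PySem.List.slice row none (some ((b.headD []).length:ℤ)))]
  have hcong : ∑ r ∈ Finset.range b.length,
      (pvLineCount ∘ fun row => PySem.List.slice row none (some ((b.headD []).length:ℤ))) (b.getD r [])
      = ∑ r ∈ Finset.range b.length,
        (fun x : ℤ => ∑ c ∈ Finset.Ico (0:ℤ) ((b.headD []).length:ℤ), pvInd b 0 1 x c) (r:ℤ) := by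
    refine Finset.sum_congr rfl (fun r hr => ?_)
    rw [Finset.mem_range] at hr
    show pvLineCount (PySem.List.slice (b.getD r []) none (some ((b.headD []).length:ℤ)))
      = (fun x : ℤ => ∑ c ∈ Finset.Ico (0:ℤ) ((b.headD []).length:ℤ), pvInd b 0 1 x c) (r:ℤ)
    rw [pvRowLine_eq b hPre r hr,
      pvRowLineSum b (r:ℤ) (by positivity) (by exact_mod_cast hr)]
  rw [hcong]
  exact pvRangeIco b.length (fun x => ∑ c ∈ Finset.Ico (0:ℤ) ((b.headD []).length:ℤ), pvInd b 0 1 x c)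

lemma pvColsTotal (b : List (List String)) :
    (((PySem.List.pyRange 0 ((b.headD []).length:ℤ) 1).map (fun c =>
        (PySem.List.pyRange 0 (b.length:ℤ) 1).map (fun r => pvCell b r c))).map pvLineCount).sum
      = ∑ r ∈ Finset.Ico (0:ℤ) (b.length:ℤ), ∑ c ∈ Finset.Ico (0:ℤ) ((b.headD []).length:ℤ), pvInd b 1 0 r c := by
  rw [List.map_map,
    pvSumPyRangeMap 0 ((b.headD []).length:ℤ) (pvLineCount ∘ fun c => (PySem.List.pyRange 0 (b.length:ℤ) 1).map (fun r => pvCell b r c))]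
  have hcong : ∑ c ∈ Finset.Ico (0:ℤ) ((b.headD []).length:ℤ),
      (pvLineCount ∘ fun c => (PySem.List.pyRange 0 (b.length:ℤ) 1).map (fun r => pvCell b r c)) c
      = ∑ c ∈ Finset.Ico (0:ℤ) ((b.headD []).length:ℤ), ∑ r ∈ Finset.Ico (0:ℤ) (b.length:ℤ), pvInd b 1 0 r c := by
    refine Finset.sum_congr rfl (fun c hc => ?_)
    rw [Finset.mem_Ico] at hc
    show pvLineCount ((PySem.List.pyRange 0 (b.length:ℤ) 1).map (fun r => pvCell b r c))
      = ∑ r ∈ Finset.Ico (0:ℤ) (b.length:ℤ), pvInd b 1 0 r c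
    exact pvColLineSum b c hc.1 hc.2
  rw [hcong]
  exact Finset.sum_comm

lemma pvDiagTotal (b : List (List String)) :
    (((PySem.List.pyRange (1 - (b.length:ℤ)) ((b.headD []).length:ℤ) 1).map (fun d =>
        ((PySem.List.pyRange 0 (b.length:ℤ) 1).filter (fun r => decide (0 ≤ r + d ∧ r + d < ((b.headD []).length:ℤ)))).map
          (fun r => pvCell b r (r + d)))).map pvLineCount).sum
      = ∑ r ∈ Finset.Ico (0:ℤ) (b.length:ℤ), ∑ c ∈ Finset.Ico (0:ℤ) ((b.headD []).length:ℤ), pvInd b 1 1 r c := by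
  rw [List.map_map,
    pvSumPyRangeMap (1 - (b.length:ℤ)) ((b.headD []).length:ℤ)
      (pvLineCount ∘ fun d => ((PySem.List.pyRange 0 (b.length:ℤ) 1).filter (fun r => decide (0 ≤ r + d ∧ r + d < ((b.headD []).length:ℤ)))).map (fun r => pvCell b r (r + d)))]
  have hcong : ∑ d ∈ Finset.Ico (1 - (b.length:ℤ)) ((b.headD []).length:ℤ),
      (pvLineCount ∘ fun d => ((PySem.List.pyRange 0 (b.length:ℤ) 1).filter (fun r => decide (0 ≤ r + d ∧ r + d < ((b.headD []).length:ℤ)))).map (fun r => pvCell b r (r + d))) d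
      = ∑ d ∈ Finset.Ico (1 - (b.length:ℤ)) ((b.headD []).length:ℤ),
          ∑ r ∈ Finset.Ico (0:ℤ) (b.length:ℤ), pvInd b 1 1 r (r + d) := by
    refine Finset.sum_congr rfl (fun d hd => ?_)
    show pvLineCount (((PySem.List.pyRange 0 (b.length:ℤ) 1).filter (fun r => decide (0 ≤ r + d ∧ r + d < ((b.headD []).length:ℤ)))).map (fun r => pvCell b r (r + d)))
      = ∑ r ∈ Finset.Ico (0:ℤ) (b.length:ℤ), pvInd b 1 1 r (r + d)
    rw [pvFilterPyRange (fun r => decide (0 ≤ r + d ∧ r + d < ((b.headD []).length:ℤ))) (-d) (((b.headD []).length:ℤ) - d)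
        (fun x => by simp only [decide_eq_true_eq]; omega) ((b.length:ℤ) - 0).toNat 0 (b.length:ℤ) rfl]
    exact pvDiagLineSum b d
  rw [hcong, Finset.sum_comm]
  refine Finset.sum_congr rfl (fun r hr => ?_)
  rw [Finset.mem_Ico] at hr
  rw [pvSumIcoShiftVar r (1 - (b.length:ℤ)) ((b.headD []).length:ℤ) (fun c => pvInd b 1 1 r c)]
  refine (Finset.sum_subset (Finset.Ico_subset_Ico (by omega) (by omega)) (fun c hc hcn => ?_)).symm
  rw [Finset.mem_Ico] at hc
  rw [Finset.mem_Ico] at hcn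
  exact pvInd_eq_zero_of_out b 1 1 r c (by intro hb; omega)

lemma pvAntiTotal (b : List (List String)) :
    (((PySem.List.pyRange 0 ((b.length:ℤ) + ((b.headD []).length:ℤ) - 1) 1).map (fun s =>
        ((PySem.List.pyRange 0 (b.length:ℤ) 1).filter (fun r => decide (0 ≤ s - r ∧ s - r < ((b.headD []).length:ℤ)))).map
          (fun r => pvCell b r (s - r)))).map pvLineCount).sum
      = ∑ r ∈ Finset.Ico (0:ℤ) (b.length:ℤ), ∑ c ∈ Finset.Ico (0:ℤ) ((b.headD []).length:ℤ), pvInd b 1 (-1) r c := by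
  rw [List.map_map,
    pvSumPyRangeMap 0 ((b.length:ℤ) + ((b.headD []).length:ℤ) - 1)
      (pvLineCount ∘ fun s => ((PySem.List.pyRange 0 (b.length:ℤ) 1).filter (fun r => decide (0 ≤ s - r ∧ s - r < ((b.headD []).length:ℤ)))).map (fun r => pvCell b r (s - r)))]
  have hcong : ∑ s ∈ Finset.Ico (0:ℤ) ((b.length:ℤ) + ((b.headD []).length:ℤ) - 1),
      (pvLineCount ∘ fun s => ((PySem.List.pyRange 0 (b.length:ℤ) 1).filter (fun r => decide (0 ≤ s - r ∧ s - r < ((b.headD []).length:ℤ)))).map (fun r => pvCell b r (s - r))) s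
      = ∑ s ∈ Finset.Ico (0:ℤ) ((b.length:ℤ) + ((b.headD []).length:ℤ) - 1),
          ∑ r ∈ Finset.Ico (0:ℤ) (b.length:ℤ), pvInd b 1 (-1) r (s - r) := by
    refine Finset.sum_congr rfl (fun s hs => ?_)
    show pvLineCount (((PySem.List.pyRange 0 (b.length:ℤ) 1).filter (fun r => decide (0 ≤ s - r ∧ s - r < ((b.headD []).length:ℤ)))).map (fun r => pvCell b r (s - r)))
      = ∑ r ∈ Finset.Ico (0:ℤ) (b.length:ℤ), pvInd b 1 (-1) r (s - r)
    rw [pvFilterPyRange (fun r => decide (0 ≤ s - r ∧ s - r < ((b.headD []).length:ℤ))) (s - ((b.headD []).length:ℤ) + 1) (s + 1)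
        (fun x => by simp only [decide_eq_true_eq]; omega) ((b.length:ℤ) - 0).toNat 0 (b.length:ℤ) rfl]
    exact pvAntiLineSum b s
  rw [hcong, Finset.sum_comm]
  refine Finset.sum_congr rfl (fun r hr => ?_)
  rw [Finset.mem_Ico] at hr
  have hre : (∑ s ∈ Finset.Ico (0:ℤ) ((b.length:ℤ) + ((b.headD []).length:ℤ) - 1), pvInd b 1 (-1) r (s - r))
      = ∑ s ∈ Finset.Ico (0:ℤ) ((b.length:ℤ) + ((b.headD []).length:ℤ) - 1), (fun c => pvInd b 1 (-1) r c) (-r + s) :=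
    Finset.sum_congr rfl (fun s _ => by rw [sub_eq_neg_add s r])
  rw [hre, pvSumIcoShiftVar (-r) 0 ((b.length:ℤ) + ((b.headD []).length:ℤ) - 1) (fun c => pvInd b 1 (-1) r c)]
  refine (Finset.sum_subset (Finset.Ico_subset_Ico (by omega) (by omega)) (fun c hc hcn => ?_)).symm
  rw [Finset.mem_Ico] at hc
  rw [Finset.mem_Ico] at hcn
  exact pvInd_eq_zero_of_out b 1 (-1) r c (by intro hb; omega)

lemma pvB_eq (b : List (List String)) (hPre : Pre_evaluate_board b) (hne : ¬ b.length = 0) :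
    evaluate_board_alt b
      = 2 * ((∑ r ∈ Finset.Ico (0:ℤ) (b.length:ℤ), ∑ c ∈ Finset.Ico (0:ℤ) ((b.headD []).length:ℤ), pvInd b 0 1 r c)
           + (∑ r ∈ Finset.Ico (0:ℤ) (b.length:ℤ), ∑ c ∈ Finset.Ico (0:ℤ) ((b.headD []).length:ℤ), pvInd b 1 0 r c)
           + (∑ r ∈ Finset.Ico (0:ℤ) (b.length:ℤ), ∑ c ∈ Finset.Ico (0:ℤ) ((b.headD []).length:ℤ), pvInd b 1 1 r c)
           + (∑ r ∈ Finset.Ico (0:ℤ) (b.length:ℤ), ∑ c ∈ Finset.Ico (0:ℤ) ((b.headD []).length:ℤ), pvInd b 1 (-1) r c)) := by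
  rw [evaluate_board_alt, if_neg hne]
  dsimp only
  rw [pvFoldlMapSum]
  rw [List.map_append, List.map_append, List.map_append,
    List.sum_append, List.sum_append, List.sum_append]
  rw [pvRowsTotal b hPre, pvColsTotal b, pvDiagTotal b, pvAntiTotal b]

lemma pvMain : ∀ (board : List (List String)),
    Dom_evaluate_board board → Pre_evaluate_board board →
      evaluate_board board = evaluate_board_alt board := by
  intro b _ hPre
  by_cases hb : b.length = 0
  · rw [List.length_eq_zero_iff] at hb
    subst hb
    rfl
  · rw [pvA_as_sums b, pvB_eq b hPre hb]
    have hsplit : (∑ r ∈ Finset.Ico (0:ℤ) (b.length:ℤ), ∑ c ∈ Finset.Ico (0:ℤ) ((b.headD []).length:ℤ), pvG b r c)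
        = (∑ r ∈ Finset.Ico (0:ℤ) (b.length:ℤ), ∑ c ∈ Finset.Ico (0:ℤ) ((b.headD []).length:ℤ), pvInd b 0 1 r c)
        + (∑ r ∈ Finset.Ico (0:ℤ) (b.length:ℤ), ∑ c ∈ Finset.Ico (0:ℤ) ((b.headD []).length:ℤ), pvInd b 1 0 r c)
        + (∑ r ∈ Finset.Ico (0:ℤ) (b.length:ℤ), ∑ c ∈ Finset.Ico (0:ℤ) ((b.headD []).length:ℤ), pvInd b 1 1 r c)
        + (∑ r ∈ Finset.Ico (0:ℤ) (b.length:ℤ), ∑ c ∈ Finset.Ico (0:ℤ) ((b.headD []).length:ℤ), pvInd b 1 (-1) r c)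
        + ((∑ r ∈ Finset.Ico (0:ℤ) (b.length:ℤ), ∑ c ∈ Finset.Ico (0:ℤ) ((b.headD []).length:ℤ), pvInd b 0 1 r (c-1))
        + (∑ r ∈ Finset.Ico (0:ℤ) (b.length:ℤ), ∑ c ∈ Finset.Ico (0:ℤ) ((b.headD []).length:ℤ), pvInd b 1 0 (r-1) c)
        + (∑ r ∈ Finset.Ico (0:ℤ) (b.length:ℤ), ∑ c ∈ Finset.Ico (0:ℤ) ((b.headD []).length:ℤ), pvInd b 1 1 (r-1) (c-1))
        + (∑ r ∈ Finset.Ico (0:ℤ) (b.length:ℤ), ∑ c ∈ Finset.Ico (0:ℤ) ((b.headD []).length:ℤ), pvInd b 1 (-1) (r-1) (c+1))) := by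
      simp only [pvG, Finset.sum_add_distrib]
      ring
    rw [hsplit]
    have s5 : (∑ r ∈ Finset.Ico (0:ℤ) (b.length:ℤ), ∑ c ∈ Finset.Ico (0:ℤ) ((b.headD []).length:ℤ), pvInd b 0 1 r (c-1))
        = ∑ r ∈ Finset.Ico (0:ℤ) (b.length:ℤ), ∑ c ∈ Finset.Ico (0:ℤ) ((b.headD []).length:ℤ), pvInd b 0 1 r c := by
      rw [← pvShift b 0 1 (by norm_num) (Or.inr (by norm_num))]
      exact Finset.sum_congr rfl (fun r _ => Finset.sum_congr rfl (fun c _ => by rw [sub_zero]))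
    have s6 : (∑ r ∈ Finset.Ico (0:ℤ) (b.length:ℤ), ∑ c ∈ Finset.Ico (0:ℤ) ((b.headD []).length:ℤ), pvInd b 1 0 (r-1) c)
        = ∑ r ∈ Finset.Ico (0:ℤ) (b.length:ℤ), ∑ c ∈ Finset.Ico (0:ℤ) ((b.headD []).length:ℤ), pvInd b 1 0 r c := by
      rw [← pvShift b 1 0 (by norm_num) (Or.inr (by norm_num))]
      exact Finset.sum_congr rfl (fun r _ => Finset.sum_congr rfl (fun c _ => by rw [sub_zero]))
    have s7 : (∑ r ∈ Finset.Ico (0:ℤ) (b.length:ℤ), ∑ c ∈ Finset.Ico (0:ℤ) ((b.headD []).length:ℤ), pvInd b 1 1 (r-1) (c-1))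
        = ∑ r ∈ Finset.Ico (0:ℤ) (b.length:ℤ), ∑ c ∈ Finset.Ico (0:ℤ) ((b.headD []).length:ℤ), pvInd b 1 1 r c :=
      pvShift b 1 1 (by norm_num) (Or.inr (by norm_num))
    have s8 : (∑ r ∈ Finset.Ico (0:ℤ) (b.length:ℤ), ∑ c ∈ Finset.Ico (0:ℤ) ((b.headD []).length:ℤ), pvInd b 1 (-1) (r-1) (c+1))
        = ∑ r ∈ Finset.Ico (0:ℤ) (b.length:ℤ), ∑ c ∈ Finset.Ico (0:ℤ) ((b.headD []).length:ℤ), pvInd b 1 (-1) r c := by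
      rw [← pvShift b 1 (-1) (by norm_num) (Or.inl rfl)]
      exact Finset.sum_congr rfl (fun r _ => Finset.sum_congr rfl (fun c _ => by rw [sub_neg_eq_add]))
    rw [s5, s6, s7, s8]
    ring

-- ===== VERDICT (by name: the statement is the Claim_ definition above) =====
theorem evaluate_board_spec : Claim_equal_evaluate_board := by
  intro board hD hP
  exact pvMain board hD hP
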